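-- pv_equiv track=rewrite | github.com/eloqlo/Code_Interview | baekjoon/21609.py | delete_group
-- ===== SOURCE A (Python) =====
-- def delete_group(A,r,c):
--
--     diff = [(1, 0), (-1, 0), (0, 1), (0, -1)]
--     N = len(A)
--     size = 0
--     color = A[r][c]
--
--     dq = [(r,c)]
--     visit = set()
--     while dq:
--         r,c = dq.pop()
--         visit.add((r,c))
--         A[r][c] = None
--         size += 1
--         for dr,dc in diff:
--             nr, nc = r + dr, c + dc
--             if 0 <= nr < N and 0 <= nc < N and (A[nr][nc] == color or A[nr][nc]==0) and (nr,nc) not in visit: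
--                 dq.append((nr, nc))
--                 visit.add((nr,nc))
--     return A, size
-- ===== SOURCE B (Python) =====
-- # BFS flood fill with a cursor queue and one deferred deletion pass
-- # (mutates A in place like the original; same final grid state).
-- def delete_group(A, r, c):
--     N = len(A)
--     color = A[r][c]
--     seen = {(r, c)}
--     queue = [(r, c)]
--     i = 0
--     while i < len(queue):
--         y, x = queue[i]
--         i += 1
--         for ny, nx in ((y + 1, x), (y - 1, x), (y, x + 1), (y, x - 1)):
--             if 0 <= ny < N and 0 <= nx < N and (ny, nx) not in seen \
--                     and (A[ny][nx] == color or A[ny][nx] == 0):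
--                 seen.add((ny, nx))
--                 queue.append((ny, nx))
--     for y, x in queue:
--         A[y][x] = None
--     return A, len(queue)
-- ===== Notes on version B (the rewrite author's own statement) =====
-- stated objective: alternative
-- what changed: Replaces the pop-from-the-end DFS stack with interleaved cell deletion by a cursor-indexed BFS queue whose discovered cells are deleted in one deferred pass at the end, with the size read off as the queue length instead of a running counter.
import Mathlib
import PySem

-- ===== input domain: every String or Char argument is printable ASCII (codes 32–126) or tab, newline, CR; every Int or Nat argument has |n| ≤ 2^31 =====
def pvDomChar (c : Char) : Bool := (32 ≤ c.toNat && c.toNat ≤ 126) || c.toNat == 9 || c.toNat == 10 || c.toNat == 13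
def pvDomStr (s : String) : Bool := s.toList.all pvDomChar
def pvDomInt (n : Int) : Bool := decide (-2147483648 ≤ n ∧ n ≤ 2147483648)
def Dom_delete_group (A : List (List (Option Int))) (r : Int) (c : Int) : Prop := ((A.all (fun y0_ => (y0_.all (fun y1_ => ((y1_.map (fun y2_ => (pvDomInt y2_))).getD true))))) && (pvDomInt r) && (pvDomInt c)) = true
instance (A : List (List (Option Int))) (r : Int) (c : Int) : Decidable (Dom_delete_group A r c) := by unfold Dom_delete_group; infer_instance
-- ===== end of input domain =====

-- B replaces A's pop-from-the-end DFS stack with interleaved deletions by a cursor-indexed BFS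
-- queue whose cells are deleted in one deferred pass (objective: alternative, same cost).
-- Both Pythons mutate A in place; the final mutated state coincides with the returned grid, and the
-- equivalence proved here is about the RETURN value.

-- ===== PORT A =====
-- shared helpers: A[r][c] read (some = value, none = IndexError) and A[r][c] = v write
def dgGet (g : List (List (Option Int))) (r c : Int) : Option (Option Int) :=
  match PySem.List.pyGet? g r with
  | none => none
  | some row => PySem.List.pyGet? row c

def dgSet (g : List (List (Option Int))) (r c : Int) (v : Option Int) : List (List (Option Int)) :=
  match PySem.List.pyGet? g r with
  | none => g          -- Python raises IndexError here; excluded by Pre_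
  | some row => PySem.List.pySetD g r (PySem.List.pySetD row c v)

-- (A[nr][nc] == color or A[nr][nc] == 0); on a ragged row Python raises where dgGet is none (excluded by Pre_)
def dgElig (g : List (List (Option Int))) (color : Option Int) (p : Int × Int) : Bool :=
  match dgGet g p.1 p.2 with
  | some v => v == color || v == some 0
  | none => false

def dgInb (N : Int) (p : Int × Int) : Bool :=
  decide (0 ≤ p.1) && decide (p.1 < N) && decide (0 ≤ p.2) && decide (p.2 < N)

def dgDiff : List (Int × Int) := [(1, 0), (-1, 0), (0, 1), (0, -1)]

-- body of A's inner 'for dr,dc in diff' loop: conditionally push (nr,nc) and add it to visit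
def dgStepA (N : Int) (color : Option Int) (g : List (List (Option Int))) (r c : Int)
    (acc : List (Int × Int) × PySem.Set (Int × Int)) (d : Int × Int) :
    List (Int × Int) × PySem.Set (Int × Int) :=
  let nr := r + d.1
  let nc := c + d.2
  if dgInb N (nr, nc) && dgElig g color (nr, nc) && !(PySem.Set.contains acc.2 (nr, nc)) then
    ((nr, nc) :: acc.1, PySem.Set.add acc.2 (nr, nc))
  else acc

-- A's while loop; the stack's top is the HEAD (Python appends and pops at the end).
-- fuel only makes the recursion structural; it never runs out under Pre_.
def dgLoopA (N : Int) (color : Option Int) :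
    Nat → List (Int × Int) → PySem.Set (Int × Int) → List (List (Option Int)) → Int →
    List (List (Option Int)) × Int
  | _, [], _, g, size => (g, size)
  | 0, _ :: _, _, g, size => (g, size)    -- unreachable under Pre_
  | Nat.succ fuel, (r, c) :: rest, visit, g, size =>
      let visit' := PySem.Set.add visit (r, c)
      let g' := dgSet g r c none
      let st := dgDiff.foldl (dgStepA N color g' r c) (rest, visit')
      dgLoopA N color fuel st.1 st.2 g' (size + 1)

def delete_group (A : List (List (Option Int))) (r : Int) (c : Int) :
    List (List (Option Int)) × Int :=
  let N : Int := PySem.List.len A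
  match dgGet A r c with
  | none => (A, 0)     -- Python raises IndexError; excluded by Pre_
  | some color => dgLoopA N color (A.length * A.length + 2) [(r, c)] PySem.Set.empty A 0

-- ===== PORT B =====
-- body of B's inner 'for ny,nx in …' loop: conditionally enqueue q and add it to seen
def dgStepB (g : List (List (Option Int))) (N : Int) (color : Option Int)
    (acc : List (Int × Int) × PySem.Set (Int × Int)) (q : Int × Int) :
    List (Int × Int) × PySem.Set (Int × Int) :=
  if dgInb N q && !(PySem.Set.contains acc.2 q) && dgElig g color q then
    (acc.1 ++ [q], PySem.Set.add acc.2 q)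
  else acc

-- B's while loop over the cursor i; returns the finished queue
def dgLoopB (g : List (List (Option Int))) (N : Int) (color : Option Int) :
    Nat → Nat → List (Int × Int) → PySem.Set (Int × Int) → List (Int × Int)
  | 0, _, queue, _ => queue    -- unreachable under Pre_
  | Nat.succ fuel, i, queue, seen =>
      if h : i < queue.length then
        let yx := queue[i]
        let st := [(yx.1 + 1, yx.2), (yx.1 - 1, yx.2), (yx.1, yx.2 + 1), (yx.1, yx.2 - 1)].foldl
          (dgStepB g N color) (queue, seen)
        dgLoopB g N color fuel (i + 1) st.1 st.2
      else queue

def delete_group_alt (A : List (List (Option Int))) (r : Int) (c : Int) :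
    List (List (Option Int)) × Int :=
  let N : Int := PySem.List.len A
  match dgGet A r c with
  | none => (A, 0)     -- Python raises IndexError; excluded by Pre_
  | some color =>
      let queue := dgLoopB A N color (A.length * A.length + 2) 0 [(r, c)]
        (PySem.Set.ofList [(r, c)])
      (queue.foldl (fun g p => dgSet g p.1 p.2 none) A, PySem.List.len queue)

-- ===== PRECONDITION & SPEC =====
-- Pre_ admits (a) square grids with an in-range non-negative start and (b) any valid (possibly
-- wrapped) start cell none of whose four neighbours passes the 0 <= nr < N, 0 <= nc < N test (there
-- the fill deletes just that cell).  It excludes other non-square grids and negative-index starts: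
-- there A may raise IndexError on a ragged row mid-fill (no closed form decides this), or reads
-- cells through Python's negative-index wraparound, where the start cell is deleted under a
-- different key than its non-negative alias and the two traversals legitimately diverge.
def Pre_delete_group (A : List (List (Option Int))) (r : Int) (c : Int) : Prop :=
  ((∀ row ∈ A, row.length = A.length) ∧
    0 ≤ r ∧ r < (A.length : Int) ∧ 0 ≤ c ∧ c < (A.length : Int)) ∨
  (PySem.Raise.InRange A.length r ∧
    PySem.Raise.InRange ((PySem.List.pyGet? A r).getD []).length c ∧
    ¬ ((0 ≤ r + 1 ∧ r + 1 < (A.length : Int) ∧ 0 ≤ c ∧ c < (A.length : Int)) ∨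
       (0 ≤ r - 1 ∧ r - 1 < (A.length : Int) ∧ 0 ≤ c ∧ c < (A.length : Int)) ∨
       (0 ≤ r ∧ r < (A.length : Int) ∧ 0 ≤ c + 1 ∧ c + 1 < (A.length : Int)) ∨
       (0 ≤ r ∧ r < (A.length : Int) ∧ 0 ≤ c - 1 ∧ c - 1 < (A.length : Int))))
instance (A : List (List (Option Int))) (r : Int) (c : Int) : Decidable (Pre_delete_group A r c) := by
  unfold Pre_delete_group; infer_instance

def pvWitness_delete_group : List (List (Option Int)) × Int × Int :=
  ([[some 1, some 1], [some 2, some 1]], 0, 0)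

def Spec_delete_group (A : List (List (Option Int))) (r : Int) (c : Int)
    (out : List (List (Option Int)) × Int) : Prop := out = delete_group_alt A r c
instance (A : List (List (Option Int))) (r : Int) (c : Int) (out : List (List (Option Int)) × Int) :
    Decidable (Spec_delete_group A r c out) := by unfold Spec_delete_group; infer_instance

-- ===== CLAIM (what is proved, stated in full; the proofs are below) =====
def Claim_equal_delete_group : Prop := ∀ (A : List (List (Option Int))) (r : Int) (c : Int),
  Dom_delete_group A r c → Pre_delete_group A r c → Spec_delete_group A r c (delete_group A r c)

-- ===== LEMMAS AND PROOFS =====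

-- abstract layer: adjacency, reachability, and the characterisation of a finished flood fill
def dgAdj (p q : Int × Int) : Prop := ∃ d ∈ dgDiff, q = (p.1 + d.1, p.2 + d.2)

inductive dgReach (g : List (List (Option Int))) (color : Option Int) (N : Int) (s : Int × Int) :
    Int × Int → Prop
  | base : dgReach g color N s s
  | step {p q : Int × Int} : dgReach g color N s p → dgAdj p q → dgInb N q = true →
      dgElig g color q = true → dgReach g color N s q

def dgGood (g : List (List (Option Int))) (color : Option Int) (N : Int) (s : Int × Int)
    (X : Finset (Int × Int)) : Prop :=
  s ∈ X ∧ (∀ p ∈ X, dgReach g color N s p) ∧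
    (∀ p ∈ X, ∀ q, dgAdj p q → dgInb N q = true → dgElig g color q = true → q ∈ X)

lemma dgReach_mem_of_closed {g : List (List (Option Int))} {color : Option Int} {N : Int}
    {s : Int × Int} {X : Finset (Int × Int)} (hs : s ∈ X)
    (hcl : ∀ p ∈ X, ∀ q, dgAdj p q → dgInb N q = true → dgElig g color q = true → q ∈ X)
    {p : Int × Int} (hp : dgReach g color N s p) : p ∈ X := by
  induction hp with
  | base => exact hs
  | step _ hadj hinb helig ih => exact hcl _ ih _ hadj hinb helig

lemma dgGood_unique {g : List (List (Option Int))} {color : Option Int} {N : Int}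
    {s : Int × Int} {X Y : Finset (Int × Int)} (hX : dgGood g color N s X)
    (hY : dgGood g color N s Y) : X = Y := by
  obtain ⟨hsX, hXr, hXc⟩ := hX
  obtain ⟨hsY, hYr, hYc⟩ := hY
  apply Finset.Subset.antisymm
  · intro p hp; exact dgReach_mem_of_closed hsY hYc (hXr p hp)
  · intro p hp; exact dgReach_mem_of_closed hsX hXc (hYr p hp)

-- the set of in-bounds cells
noncomputable def dgAll (N : Int) : Finset (Int × Int) := Finset.Ico 0 N ×ˢ Finset.Ico 0 N

lemma dgMem_all {N : Int} {p : Int × Int} : p ∈ dgAll N ↔ dgInb N p = true := by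
  simp [dgAll, dgInb, Finset.mem_product]
  tauto

lemma dgCard_all (N : Int) : (dgAll N).card = N.toNat * N.toNat := by
  simp [dgAll, Int.card_Ico]

-- marking a set of cells as deleted, as a function of the set
def dgMark (g : List (List (Option Int))) (X : Finset (Int × Int)) : List (List (Option Int)) :=
  g.mapIdx (fun i row => row.mapIdx (fun j v => if ((i : Int), (j : Int)) ∈ X then none else v))

lemma dgMapIdx_id {α : Type} (l : List α) : List.mapIdx (fun _ v => v) l = l := by
  induction l with
  | nil => rfl
  | cons a l ih => simpa [List.mapIdx_cons] using ih

lemma dgMark_empty (g : List (List (Option Int))) : dgMark g ∅ = g := by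
  unfold dgMark
  apply List.ext_getElem (by simp)
  intro i h1 h2
  simp [List.getElem_mapIdx]
  exact dgMapIdx_id _

lemma dgGet_mark_of_not_mem {g : List (List (Option Int))} {X : Finset (Int × Int)}
    (hsq : ∀ row ∈ g, row.length = g.length) {p : Int × Int}
    (hinb : dgInb (g.length : Int) p = true) (hp : p ∉ X) :
    dgGet (dgMark g X) p.1 p.2 = dgGet g p.1 p.2 := by
  simp only [dgInb, Bool.and_eq_true, decide_eq_true_eq] at hinb
  obtain ⟨⟨⟨h1, h2⟩, h3⟩, h4⟩ := hinb
  have hlen : ((dgMark g X).length : Int) = (g.length : Int) := by simp [dgMark]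
  have hrow : g[p.1.toNat]'(by omega) ∈ g := List.getElem_mem _
  have hrl : (g[p.1.toNat]'(by omega)).length = g.length := hsq _ hrow
  unfold dgGet
  rw [PySem.List.pyGet?_eq_some_getElem (dgMark g X) h1 (by rw [hlen]; exact h2),
      PySem.List.pyGet?_eq_some_getElem g h1 h2]
  dsimp only
  have hm : (dgMark g X)[p.1.toNat]'(by simp [dgMark]; omega) =
      (g[p.1.toNat]'(by omega)).mapIdx
        (fun j v => if ((p.1.toNat : Int), (j : Int)) ∈ X then none else v) := by
    simp [dgMark, List.getElem_mapIdx]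
  rw [hm]
  rw [PySem.List.pyGet?_eq_some_getElem _ h3 (by simp [hrl]; omega),
      PySem.List.pyGet?_eq_some_getElem _ h3 (by rw [hrl]; omega)]
  simp only [List.getElem_mapIdx]
  rw [if_neg]
  have : ((p.1.toNat : Int), (p.2.toNat : Int)) = p := by
    rw [Int.toNat_of_nonneg h1, Int.toNat_of_nonneg h3]
  rw [this]
  exact hp

lemma dgElig_mark_of_not_mem {g : List (List (Option Int))} {X : Finset (Int × Int)}
    {color : Option Int} (hsq : ∀ row ∈ g, row.length = g.length) {p : Int × Int}
    (hinb : dgInb (g.length : Int) p = true) (hp : p ∉ X) :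
    dgElig (dgMark g X) color p = dgElig g color p := by
  unfold dgElig
  rw [dgGet_mark_of_not_mem hsq hinb hp]

lemma dgSet_mark {g : List (List (Option Int))} {X : Finset (Int × Int)}
    (hsq : ∀ row ∈ g, row.length = g.length) {p : Int × Int}
    (hinb : dgInb (g.length : Int) p = true) :
    dgSet (dgMark g X) p.1 p.2 none = dgMark g (insert p X) := by
  simp only [dgInb, Bool.and_eq_true, decide_eq_true_eq] at hinb
  obtain ⟨⟨⟨h1, h2⟩, h3⟩, h4⟩ := hinb
  have hlen : ((dgMark g X).length : Int) = (g.length : Int) := by simp [dgMark]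
  unfold dgSet
  rw [PySem.List.pyGet?_eq_some_getElem (dgMark g X) h1 (by rw [hlen]; exact h2)]
  dsimp only
  rw [PySem.List.pySetD_of_nonneg _ _ h3, PySem.List.pySetD_of_nonneg _ _ h1]
  apply List.ext_getElem (by simp [dgMark])
  intro i hi1 hi2
  have hgi : i < g.length := by simp [dgMark] at hi2; omega
  have hrowmem : g[i]'hgi ∈ g := List.getElem_mem _
  have hrl : (g[i]'hgi).length = g.length := hsq _ hrowmem
  have hmi : ∀ (Y : Finset (Int × Int)) (hy : i < (dgMark g Y).length),
      (dgMark g Y)[i]'hy =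
      (g[i]'hgi).mapIdx (fun j v => if ((i : Int), (j : Int)) ∈ Y then none else v) := by
    intro Y hy
    simp [dgMark, List.getElem_mapIdx]
  by_cases hip : i = p.1.toNat
  · subst hip
    rw [List.getElem_set_self]
    rw [hmi X (by simp [dgMark]; omega), hmi (insert p X) (by simp [dgMark]; omega)]
    apply List.ext_getElem (by simp)
    intro j hj1 hj2
    simp only [List.getElem_mapIdx] at hj1 hj2 ⊢
    have hjlt : j < (g[p.1.toNat]'hgi).length := by
      simpa using hj2
    by_cases hjp : j = p.2.toNat
    · subst hjp
      rw [List.getElem_set_self]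
      rw [if_pos (by
        have hpp : ((p.1.toNat : Int), (p.2.toNat : Int)) = p := by
          rw [Int.toNat_of_nonneg h1, Int.toNat_of_nonneg h3]
        rw [hpp]
        exact Finset.mem_insert_self p X)]
    · rw [List.getElem_set_ne (by omega) (by simpa using hj1)]
      simp only [List.getElem_mapIdx]
      have hne : (p.1, (j : Int)) ≠ p := by
        intro he
        apply hjp
        have : (j : Int) = p.2 := congrArg Prod.snd he
        omega
      simp [Finset.mem_insert, Int.toNat_of_nonneg h1, hne]
  · rw [List.getElem_set_ne (by omega) (by simpa [dgMark] using hi1)]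
    rw [hmi X (by simp [dgMark]; omega), hmi (insert p X) (by simp [dgMark]; omega)]
    apply List.ext_getElem (by simp)
    intro j hj1 hj2
    simp only [List.getElem_mapIdx]
    have hne : ((i : Int), (j : Int)) ≠ p := by
      intro he
      apply hip
      have : (i : Int) = p.1 := congrArg Prod.fst he
      omega
    simp [Finset.mem_insert, hne]

lemma dgFoldSet_mark {g : List (List (Option Int))} (hsq : ∀ row ∈ g, row.length = g.length) :
    ∀ (l : List (Int × Int)) (X : Finset (Int × Int)),
    (∀ p ∈ l, dgInb (g.length : Int) p = true) →
    l.foldl (fun h p => dgSet h p.1 p.2 none) (dgMark g X) = dgMark g (X ∪ l.toFinset) := by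
  intro l
  induction l with
  | nil => intro X _; simp
  | cons q l ih =>
      intro X hinb
      simp only [List.foldl_cons]
      rw [dgSet_mark hsq (hinb q (by simp)), ih _ (fun p hp => hinb p (by simp [hp]))]
      congr 1
      ext p
      simp
      try tauto

-- toFinset of a PySem.Set add
lemma dgToFinset_add (s : PySem.Set (Int × Int)) (x : Int × Int) :
    (PySem.Set.add s x).toFinset = insert x s.toFinset := by
  ext p
  simp [PySem.Set.mem_add]
  tauto

-- one conditional push of A's inner loop, folded over an arbitrary offset list
lemma dgFoldA_inv (g : List (List (Option Int))) (color : Option Int) (s : Int × Int)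
    (hsq : ∀ row ∈ g, row.length = g.length) (x : Int × Int) (P : Finset (Int × Int))
    (hxr : dgReach g color (g.length : Int) s x) :
    ∀ (ds : List (Int × Int)), (∀ d ∈ ds, dgAdj x (x.1 + d.1, x.2 + d.2)) →
    ∀ (rest : List (Int × Int)) (vs : PySem.Set (Int × Int)),
    (∀ p : Int × Int, p ∈ vs ↔ p ∈ P ∨ p ∈ rest) →
    rest.Nodup → (∀ p ∈ rest, p ∉ P) →
    (∀ p ∈ rest, dgInb (g.length : Int) p = true) →
    (∀ p ∈ rest, dgReach g color (g.length : Int) s p) →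
    ∀ dq' vs', ds.foldl (dgStepA (g.length : Int) color (dgMark g P) x.1 x.2) (rest, vs) = (dq', vs') →
    ((∀ p : Int × Int, p ∈ vs' ↔ p ∈ P ∨ p ∈ dq') ∧ dq'.Nodup ∧
     (∀ p ∈ dq', p ∉ P) ∧ (∀ p ∈ dq', dgInb (g.length : Int) p = true) ∧
     (∀ p ∈ dq', dgReach g color (g.length : Int) s p) ∧
     (∀ p : Int × Int, p ∈ vs → p ∈ vs') ∧
     (∀ d ∈ ds, dgInb (g.length : Int) (x.1 + d.1, x.2 + d.2) = true →
        dgElig g color (x.1 + d.1, x.2 + d.2) = true → (x.1 + d.1, x.2 + d.2) ∈ vs') ∧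
     ((dgAll (g.length : Int) \ vs'.toFinset).card + dq'.length =
        (dgAll (g.length : Int) \ vs.toFinset).card + rest.length)) := by
  intro ds
  induction ds with
  | nil =>
      intro _ rest vs hvs hnd hdisj hrinb hrreach dq' vs' heq
      obtain ⟨rfl, rfl⟩ : rest = dq' ∧ vs = vs' := by
        simpa using congrArg (fun t => (t.1, t.2)) heq |> fun h => ⟨congrArg Prod.fst heq, congrArg Prod.snd heq⟩
      exact ⟨hvs, hnd, hdisj, hrinb, hrreach, fun p hp => hp, by simp, rfl⟩
  | cons d ds ih =>
      intro hadj rest vs hvs hnd hdisj hrinb hrreach dq' vs' heq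
      have hq : dgAdj x (x.1 + d.1, x.2 + d.2) := hadj d (by simp)
      simp only [List.foldl_cons] at heq
      by_cases hcond : (dgInb (g.length : Int) (x.1 + d.1, x.2 + d.2) &&
          dgElig (dgMark g P) color (x.1 + d.1, x.2 + d.2) &&
          !(PySem.Set.contains vs (x.1 + d.1, x.2 + d.2))) = true
      · -- pushed
        have hstep : dgStepA (g.length : Int) color (dgMark g P) x.1 x.2 (rest, vs) d =
            ((x.1 + d.1, x.2 + d.2) :: rest, PySem.Set.add vs (x.1 + d.1, x.2 + d.2)) := by
          simp only [dgStepA, hcond, if_true]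
        rw [hstep] at heq
        simp only [Bool.and_eq_true, Bool.not_eq_true'] at hcond
        obtain ⟨⟨hinbq, heligm⟩, hcont⟩ := hcond
        have hnotvs : (x.1 + d.1, x.2 + d.2) ∉ vs := by
          intro hmem
          rw [(PySem.Set.contains_iff vs _).mpr hmem] at hcont
          exact absurd hcont (by simp)
        have hnotP : (x.1 + d.1, x.2 + d.2) ∉ P := fun h => hnotvs ((hvs _).mpr (Or.inl h))
        have hnotrest : (x.1 + d.1, x.2 + d.2) ∉ rest := fun h => hnotvs ((hvs _).mpr (Or.inr h))
        have helig0 : dgElig g color (x.1 + d.1, x.2 + d.2) = true := by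
          rwa [dgElig_mark_of_not_mem hsq hinbq hnotP] at heligm
        have hreachq : dgReach g color (g.length : Int) s (x.1 + d.1, x.2 + d.2) :=
          dgReach.step hxr hq hinbq helig0
        have hvs' : ∀ p : Int × Int, p ∈ PySem.Set.add vs (x.1 + d.1, x.2 + d.2) ↔
            p ∈ P ∨ p ∈ (x.1 + d.1, x.2 + d.2) :: rest := by
          intro p
          rw [PySem.Set.mem_add]
          simp only [List.mem_cons, hvs]
          tauto
        obtain ⟨c1, c2, c3, c4, c5, c6, c7, c8⟩ := ih (fun e he => hadj e (by simp [he]))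
          ((x.1 + d.1, x.2 + d.2) :: rest) (PySem.Set.add vs (x.1 + d.1, x.2 + d.2)) hvs'
          (by exact List.nodup_cons.mpr ⟨hnotrest, hnd⟩)
          (by intro p hp; rcases List.mem_cons.mp hp with h | h
              · subst h; exact hnotP
              · exact hdisj p h)
          (by intro p hp; rcases List.mem_cons.mp hp with h | h
              · subst h; exact hinbq
              · exact hrinb p h)
          (by intro p hp; rcases List.mem_cons.mp hp with h | h
              · subst h; exact hreachq
              · exact hrreach p h)
          dq' vs' heq
        refine ⟨c1, c2, c3, c4, c5, ?_, ?_, ?_⟩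
        · intro p hp
          exact c6 p (by rw [PySem.Set.mem_add]; exact Or.inl hp)
        · intro e he hinbe helige
          rcases List.mem_cons.mp he with rfl | h
          · exact c6 _ (by rw [PySem.Set.mem_add]; exact Or.inr rfl)
          · exact c7 e h hinbe helige
        · rw [c8]
          have hqall : (x.1 + d.1, x.2 + d.2) ∈ dgAll (g.length : Int) \ vs.toFinset := by
            rw [Finset.mem_sdiff, dgMem_all]
            exact ⟨hinbq, by rwa [List.mem_toFinset]⟩
          have hpos : 0 < (dgAll (g.length : Int) \ vs.toFinset).card :=
            Finset.card_pos.mpr ⟨_, hqall⟩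
          have htf : (PySem.Set.add vs (x.1 + d.1, x.2 + d.2)).toFinset =
              insert (x.1 + d.1, x.2 + d.2) vs.toFinset := dgToFinset_add vs _
          rw [htf, Finset.sdiff_insert, Finset.card_erase_of_mem hqall]
          simp only [List.length_cons]
          omega
      · -- not pushed
        have hstep : dgStepA (g.length : Int) color (dgMark g P) x.1 x.2 (rest, vs) d =
            (rest, vs) := by
          simp only [dgStepA]
          rw [if_neg (by simpa using hcond)]
        rw [hstep] at heq
        obtain ⟨c1, c2, c3, c4, c5, c6, c7, c8⟩ := ih (fun e he => hadj e (by simp [he]))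
          rest vs hvs hnd hdisj hrinb hrreach dq' vs' heq
        refine ⟨c1, c2, c3, c4, c5, c6, ?_, c8⟩
        intro e he hinbe helige
        rcases List.mem_cons.mp he with rfl | h
        · by_cases hmem : (x.1 + e.1, x.2 + e.2) ∈ vs
          · exact c6 _ hmem
          · exfalso
            apply hcond
            have hnotP : (x.1 + e.1, x.2 + e.2) ∉ P := fun hh => hmem ((hvs _).mpr (Or.inl hh))
            rw [hinbe, dgElig_mark_of_not_mem hsq hinbe hnotP, helige]
            simp only [Bool.true_and]
            rw [Bool.not_eq_true']
            rw [← Bool.not_eq_true]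
            intro hc
            exact hmem ((PySem.Set.contains_iff vs _).mp hc)
        · exact c7 e h hinbe helige

-- A's while loop computes the marked grid and size of a finished flood fill
lemma dgLoopA_spec (g : List (List (Option Int))) (color : Option Int) (s : Int × Int)
    (hsq : ∀ row ∈ g, row.length = g.length) :
    ∀ (fuel : Nat) (dq : List (Int × Int)) (visit : PySem.Set (Int × Int))
      (P : Finset (Int × Int)) (size : Int),
    (∀ p : Int × Int, (p ∈ visit ∨ p ∈ dq) ↔ (p ∈ P ∨ p ∈ dq)) →
    (∀ p ∈ P, p ∈ visit) →
    (∀ p ∈ dq.tail, p ∈ visit) →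
    dq.Nodup →
    (∀ p ∈ dq, p ∉ P) →
    (∀ p : Int × Int, p ∈ P ∨ p ∈ dq → dgInb (g.length : Int) p = true) →
    (∀ p : Int × Int, p ∈ P ∨ p ∈ dq → dgReach g color (g.length : Int) s p) →
    (∀ p ∈ P, ∀ q, dgAdj p q → dgInb (g.length : Int) q = true →
       dgElig g color q = true → q ∈ visit) →
    (s ∈ P ∨ s ∈ dq) →
    size = (P.card : Int) →
    (dgAll (g.length : Int) \ visit.toFinset).card + dq.length ≤ fuel →
    ∃ X : Finset (Int × Int), dgGood g color (g.length : Int) s X ∧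
      dgLoopA (g.length : Int) color fuel dq visit (dgMark g P) size = (dgMark g X, (X.card : Int)) := by
  intro fuel
  induction fuel with
  | zero =>
      intro dq visit P size hw1 hw2 hw3 hnd hdisj hinb hreach hclosed hstart hsize hfuel
      cases dq with
      | nil =>
          refine ⟨P, ⟨?_, ?_, ?_⟩, ?_⟩
          · rcases hstart with h | h
            · exact h
            · simp at h
          · exact fun p hp => hreach p (Or.inl hp)
          · intro p hp q hadj hinbq heligq
            have hqv := hclosed p hp q hadj hinbq heligq
            rcases (hw1 q).mp (Or.inl hqv) with h | h
            · exact h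
            · simp at h
          · simp [dgLoopA, hsize]
      | cons x rest => simp at hfuel
  | succ fuel ih =>
      intro dq visit P size hw1 hw2 hw3 hnd hdisj hinb hreach hclosed hstart hsize hfuel
      cases dq with
      | nil =>
          refine ⟨P, ⟨?_, ?_, ?_⟩, ?_⟩
          · rcases hstart with h | h
            · exact h
            · simp at h
          · exact fun p hp => hreach p (Or.inl hp)
          · intro p hp q hadj hinbq heligq
            have hqv := hclosed p hp q hadj hinbq heligq
            rcases (hw1 q).mp (Or.inl hqv) with h | h
            · exact h
            · simp at h
          · simp [dgLoopA, hsize]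
      | cons x rest =>
          obtain ⟨x1, x2⟩ := x
          have hxinb : dgInb (g.length : Int) (x1, x2) = true := hinb _ (Or.inr (by simp))
          have hxreach : dgReach g color (g.length : Int) s (x1, x2) := hreach _ (Or.inr (by simp))
          have hxnotP : (x1, x2) ∉ P := hdisj _ (by simp)
          have hxrest : (x1, x2) ∉ rest := (List.nodup_cons.mp hnd).1
          have hndr : rest.Nodup := (List.nodup_cons.mp hnd).2
          have hvs1 : ∀ p : Int × Int, p ∈ PySem.Set.add visit (x1, x2) ↔
              p ∈ insert (x1, x2) P ∨ p ∈ rest := by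
            intro p
            rw [PySem.Set.mem_add, Finset.mem_insert]
            constructor
            · rintro (hv | rfl)
              · rcases (hw1 p).mp (Or.inl hv) with h | h
                · exact Or.inl (Or.inr h)
                · rcases List.mem_cons.mp h with rfl | h
                  · exact Or.inl (Or.inl rfl)
                  · exact Or.inr h
              · exact Or.inl (Or.inl rfl)
            · rintro ((rfl | hP) | hr)
              · exact Or.inr rfl
              · exact Or.inl (hw2 p hP)
              · exact Or.inl (hw3 p hr)
          rcases hfold : dgDiff.foldl
              (dgStepA (g.length : Int) color (dgMark g (insert (x1, x2) P)) x1 x2)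
              (rest, PySem.Set.add visit (x1, x2)) with ⟨dq', vs'⟩
          obtain ⟨c1, c2, c3, c4, c5, c6, c7, c8⟩ :=
            dgFoldA_inv g color s hsq (x1, x2) (insert (x1, x2) P) hxreach dgDiff
              (by intro d hd; exact ⟨d, hd, rfl⟩)
              rest (PySem.Set.add visit (x1, x2)) hvs1 hndr
              (by intro p hp
                  rw [Finset.mem_insert]
                  rintro (rfl | hP)
                  · exact hxrest hp
                  · exact hdisj p (by simp [hp]) hP)
              (fun p hp => hinb p (Or.inr (by simp [hp])))
              (fun p hp => hreach p (Or.inr (by simp [hp])))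
              dq' vs' hfold
          have hvisit_sub : ∀ p : Int × Int, p ∈ visit → p ∈ PySem.Set.add visit (x1, x2) := by
            intro p hp
            rw [PySem.Set.mem_add]
            exact Or.inl hp
          obtain ⟨X, hgood, heq⟩ := ih dq' vs' (insert (x1, x2) P) (size + 1)
            (by intro p; constructor
                · rintro (hv | hd)
                  · exact (c1 p).mp hv
                  · exact Or.inr hd
                · rintro (hP | hd)
                  · exact Or.inl ((c1 p).mpr (Or.inl hP))
                  · exact Or.inr hd)
            (fun p hP => (c1 p).mpr (Or.inl hP))
            (fun p hp => (c1 p).mpr (Or.inr (List.mem_of_mem_tail hp)))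
            c2 c3
            (by rintro p (hP | hd)
                · rcases Finset.mem_insert.mp hP with rfl | h
                  · exact hxinb
                  · exact hinb p (Or.inl h)
                · exact c4 p hd)
            (by rintro p (hP | hd)
                · rcases Finset.mem_insert.mp hP with rfl | h
                  · exact hxreach
                  · exact hreach p (Or.inl h)
                · exact c5 p hd)
            (by intro p hP q hadj hinbq heligq
                rcases Finset.mem_insert.mp hP with rfl | h
                · obtain ⟨d, hd, rfl⟩ := hadj
                  exact c7 d hd hinbq heligq
                · exact c6 q (hvisit_sub q (hclosed p h q hadj hinbq heligq)))
            (by rcases hstart with h | h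
                · exact Or.inl (Finset.mem_insert_of_mem h)
                · rcases List.mem_cons.mp h with rfl | h
                  · exact Or.inl (Finset.mem_insert_self _ _)
                  · rcases (c1 s).mp (c6 s (hvisit_sub s (hw3 s h))) with hh | hh
                    · exact Or.inl hh
                    · exact Or.inr hh)
            (by rw [hsize, Finset.card_insert_of_notMem hxnotP]; push_cast; ring)
            (by
              have hsub : (dgAll (g.length : Int) \ (PySem.Set.add visit (x1, x2)).toFinset).card ≤
                  (dgAll (g.length : Int) \ visit.toFinset).card := by
                apply Finset.card_le_card
                apply Finset.sdiff_subset_sdiff (Finset.Subset.refl _)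
                rw [dgToFinset_add]
                exact Finset.subset_insert _ _
              simp only [List.length_cons] at hfuel
              omega)
          refine ⟨X, hgood, ?_⟩
          rw [show dgLoopA (g.length : Int) color (fuel + 1) ((x1, x2) :: rest) visit
                (dgMark g P) size =
              dgLoopA (g.length : Int) color fuel
                (dgDiff.foldl (dgStepA (g.length : Int) color
                    (dgSet (dgMark g P) x1 x2 none) x1 x2)
                  (rest, PySem.Set.add visit (x1, x2))).1
                (dgDiff.foldl (dgStepA (g.length : Int) color
                    (dgSet (dgMark g P) x1 x2 none) x1 x2)
                  (rest, PySem.Set.add visit (x1, x2))).2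
                (dgSet (dgMark g P) x1 x2 none) (size + 1) from rfl]
          rw [show dgSet (dgMark g P) x1 x2 none = dgMark g (insert (x1, x2) P) from
            dgSet_mark hsq (p := (x1, x2)) hxinb]
          rw [hfold]
          exact heq

-- one conditional enqueue of B's inner loop, folded over an arbitrary neighbour list
lemma dgFoldB_inv (g : List (List (Option Int))) (color : Option Int) (s : Int × Int)
    (x : Int × Int) (hxr : dgReach g color (g.length : Int) s x) :
    ∀ (qs : List (Int × Int)), (∀ q ∈ qs, dgAdj x q) →
    ∀ (queue : List (Int × Int)) (seen : PySem.Set (Int × Int)),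
    (∀ p : Int × Int, p ∈ seen ↔ p ∈ queue) →
    queue.Nodup →
    (∀ p ∈ queue, dgInb (g.length : Int) p = true) →
    (∀ p ∈ queue, dgReach g color (g.length : Int) s p) →
    ∀ queue' seen', qs.foldl (dgStepB g (g.length : Int) color) (queue, seen) = (queue', seen') →
    ((∃ pushed : List (Int × Int), queue' = queue ++ pushed) ∧
     (∀ p : Int × Int, p ∈ seen' ↔ p ∈ queue') ∧ queue'.Nodup ∧
     (∀ p ∈ queue', dgInb (g.length : Int) p = true) ∧
     (∀ p ∈ queue', dgReach g color (g.length : Int) s p) ∧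
     (∀ q ∈ qs, dgInb (g.length : Int) q = true → dgElig g color q = true → q ∈ seen') ∧
     ((dgAll (g.length : Int) \ seen'.toFinset).card + queue'.length =
        (dgAll (g.length : Int) \ seen.toFinset).card + queue.length)) := by
  intro qs
  induction qs with
  | nil =>
      intro _ queue seen hseen hnd hinb hreach queue' seen' heq
      obtain ⟨rfl, rfl⟩ : queue = queue' ∧ seen = seen' :=
        ⟨congrArg Prod.fst heq, congrArg Prod.snd heq⟩
      exact ⟨⟨[], by simp⟩, hseen, hnd, hinb, hreach, by simp, rfl⟩
  | cons q qs ih =>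
      intro hqs queue seen hseen hnd hinb hreach queue' seen' heq
      have hadjq : dgAdj x q := hqs q (by simp)
      simp only [List.foldl_cons] at heq
      by_cases hcond : (dgInb (g.length : Int) q && !(PySem.Set.contains seen q) &&
          dgElig g color q) = true
      · have hstep : dgStepB g (g.length : Int) color (queue, seen) q =
            (queue ++ [q], PySem.Set.add seen q) := by
          simp only [dgStepB, hcond, if_true]
        rw [hstep] at heq
        simp only [Bool.and_eq_true, Bool.not_eq_true'] at hcond
        obtain ⟨⟨hinbq, hcont⟩, heligq⟩ := hcond
        have hnotseen : q ∉ seen := by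
          intro hmem
          rw [(PySem.Set.contains_iff seen _).mpr hmem] at hcont
          exact absurd hcont (by simp)
        have hnotqueue : q ∉ queue := fun h => hnotseen ((hseen q).mpr h)
        have hreachq : dgReach g color (g.length : Int) s q :=
          dgReach.step hxr hadjq hinbq heligq
        obtain ⟨⟨pushed, hpref⟩, c2, c3, c4, c5, c6, c7⟩ := ih
          (fun e he => hqs e (by simp [he]))
          (queue ++ [q]) (PySem.Set.add seen q)
          (by intro p
              rw [PySem.Set.mem_add]
              simp only [List.mem_append, List.mem_singleton, hseen]
              try tauto)
          (by simp [List.nodup_append, hnd]; intro a b hab heq; exact hnotqueue (heq ▸ hab))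
          (by intro p hp
              rcases List.mem_append.mp hp with h | h
              · exact hinb p h
              · rw [List.mem_singleton.mp h]; exact hinbq)
          (by intro p hp
              rcases List.mem_append.mp hp with h | h
              · exact hreach p h
              · rw [List.mem_singleton.mp h]; exact hreachq)
          queue' seen' heq
        refine ⟨⟨q :: pushed, by simp [hpref]⟩, c2, c3, c4, c5, ?_, ?_⟩
        · intro e he hinbe helige
          rcases List.mem_cons.mp he with rfl | h
          · exact (c2 e).mpr (by rw [hpref]; simp)
          · exact c6 e h hinbe helige
        · rw [c7]
          have hqall : q ∈ dgAll (g.length : Int) \ seen.toFinset := by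
            rw [Finset.mem_sdiff, dgMem_all]
            exact ⟨hinbq, by rwa [List.mem_toFinset]⟩
          have hpos : 0 < (dgAll (g.length : Int) \ seen.toFinset).card :=
            Finset.card_pos.mpr ⟨_, hqall⟩
          rw [dgToFinset_add, Finset.sdiff_insert, Finset.card_erase_of_mem hqall]
          simp only [List.length_append, List.length_singleton]
          omega
      · have hstep : dgStepB g (g.length : Int) color (queue, seen) q = (queue, seen) := by
          simp only [dgStepB]
          rw [if_neg (by simpa using hcond)]
        rw [hstep] at heq
        obtain ⟨c1, c2, c3, c4, c5, c6, c7⟩ := ih (fun e he => hqs e (by simp [he]))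
          queue seen hseen hnd hinb hreach queue' seen' heq
        refine ⟨c1, c2, c3, c4, c5, ?_, c7⟩
        intro e he hinbe helige
        rcases List.mem_cons.mp he with rfl | h
        · by_cases hmem : e ∈ seen
          · obtain ⟨pushed, hpref⟩ := c1
            exact (c2 e).mpr (by rw [hpref]; exact List.mem_append_left _ ((hseen e).mp hmem))
          · exfalso
            apply hcond
            rw [hinbe, helige]
            simp only [Bool.true_and, Bool.and_true]
            rw [Bool.not_eq_true']
            rw [← Bool.not_eq_true]
            intro hc
            exact hmem ((PySem.Set.contains_iff seen _).mp hc)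
        · exact c6 e h hinbe helige

-- B's while loop returns exactly the cells of a finished flood fill, without duplicates
lemma dgLoopB_spec (g : List (List (Option Int))) (color : Option Int) (s : Int × Int) :
    ∀ (fuel : Nat) (i : Nat) (queue : List (Int × Int)) (seen : PySem.Set (Int × Int)),
    (∀ p : Int × Int, p ∈ seen ↔ p ∈ queue) →
    queue.Nodup →
    (∀ p ∈ queue, dgInb (g.length : Int) p = true) →
    (∀ p ∈ queue, dgReach g color (g.length : Int) s p) →
    (∀ p ∈ queue.take i, ∀ q, dgAdj p q → dgInb (g.length : Int) q = true →
       dgElig g color q = true → q ∈ seen) →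
    s ∈ queue →
    (queue.length - i) + (dgAll (g.length : Int) \ seen.toFinset).card ≤ fuel →
    ∃ qf : List (Int × Int), dgLoopB g (g.length : Int) color fuel i queue seen = qf ∧
      qf.Nodup ∧ (∀ p ∈ qf, dgInb (g.length : Int) p = true) ∧
      dgGood g color (g.length : Int) s qf.toFinset := by
  intro fuel
  induction fuel with
  | zero =>
      intro i queue seen hseen hnd hinb hreach hclosed hstart hfuel
      have hile : queue.length ≤ i := by omega
      refine ⟨queue, by simp [dgLoopB], hnd, hinb, ⟨?_, ?_, ?_⟩⟩
      · rwa [List.mem_toFinset]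
      · intro p hp; exact hreach p (List.mem_toFinset.mp hp)
      · intro p hp q hadj hinbq heligq
        rw [List.mem_toFinset] at hp
        rw [List.mem_toFinset]
        exact (hseen q).mp
          (hclosed p (by rwa [List.take_of_length_le hile]) q hadj hinbq heligq)
  | succ fuel ih =>
      intro i queue seen hseen hnd hinb hreach hclosed hstart hfuel
      by_cases hlt : i < queue.length
      · rcases hfold : [((queue[i]'hlt).1 + 1, (queue[i]'hlt).2),
            ((queue[i]'hlt).1 - 1, (queue[i]'hlt).2),
            ((queue[i]'hlt).1, (queue[i]'hlt).2 + 1),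
            ((queue[i]'hlt).1, (queue[i]'hlt).2 - 1)].foldl
            (dgStepB g (g.length : Int) color) (queue, seen) with ⟨queue1, seen1⟩
        have hxr : dgReach g color (g.length : Int) s (queue[i]'hlt) :=
          hreach _ (List.getElem_mem hlt)
        have hqs : ∀ q ∈ [((queue[i]'hlt).1 + 1, (queue[i]'hlt).2),
            ((queue[i]'hlt).1 - 1, (queue[i]'hlt).2),
            ((queue[i]'hlt).1, (queue[i]'hlt).2 + 1),
            ((queue[i]'hlt).1, (queue[i]'hlt).2 - 1)], dgAdj (queue[i]'hlt) q := by
          intro q hq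
          simp only [List.mem_cons, List.not_mem_nil, or_false] at hq
          rcases hq with rfl | rfl | rfl | rfl
          · exact ⟨(1, 0), by simp [dgDiff], by simp⟩
          · exact ⟨(-1, 0), by simp [dgDiff], by simp; ring⟩
          · exact ⟨(0, 1), by simp [dgDiff], by simp⟩
          · exact ⟨(0, -1), by simp [dgDiff], by simp; ring⟩
        obtain ⟨⟨pushed, hpref⟩, c2, c3, c4, c5, c6, c7⟩ :=
          dgFoldB_inv g color s (queue[i]'hlt) hxr _ hqs queue seen hseen hnd hinb hreach
            queue1 seen1 hfold
        obtain ⟨qf, heqf, hndf, hinbf, hgoodf⟩ := ih (i + 1) queue1 seen1 c2 c3 c4 c5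
          (by intro p hp q hadj hinbq heligq
              have hi1 : i + 1 ≤ queue.length := hlt
              rw [hpref, List.take_append_of_le_length hi1] at hp
              rw [List.take_add_one] at hp
              rcases List.mem_append.mp hp with h | h
              · have hq_seen := hclosed p h q hadj hinbq heligq
                exact (c2 q).mpr (by rw [hpref]; exact List.mem_append_left _ ((hseen q).mp hq_seen))
              · have hpx : p = queue[i]'hlt := by
                  simp [List.getElem?_eq_getElem hlt] at h
                  exact h
                subst hpx
                obtain ⟨d, hd, rfl⟩ := hadj
                simp only [dgDiff, List.mem_cons, List.not_mem_nil, or_false] at hd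
                rcases hd with rfl | rfl | rfl | rfl
                · exact c6 _ (by simp [sub_eq_add_neg]) (by simpa using hinbq)
                    (by simpa using heligq)
                · exact c6 _ (by simp [sub_eq_add_neg]) (by simpa using hinbq)
                    (by simpa using heligq)
                · exact c6 _ (by simp [sub_eq_add_neg]) (by simpa using hinbq)
                    (by simpa using heligq)
                · exact c6 _ (by simp [sub_eq_add_neg]) (by simpa using hinbq)
                    (by simpa using heligq))
          (by rw [hpref]; exact List.mem_append_left _ hstart)
          (by rw [hpref] at c7 ⊢
              simp only [List.length_append] at c7 ⊢
              omega)
        refine ⟨qf, ?_, hndf, hinbf, hgoodf⟩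
        rw [show dgLoopB g (g.length : Int) color (fuel + 1) i queue seen =
            dgLoopB g (g.length : Int) color fuel (i + 1) queue1 seen1 from ?_]
        · exact heqf
        · rw [dgLoopB]
          rw [dif_pos hlt]
          simp only [hfold]
      · refine ⟨queue, ?_, hnd, hinb, ⟨?_, ?_, ?_⟩⟩
        · rw [dgLoopB]; rw [dif_neg hlt]
        · rwa [List.mem_toFinset]
        · intro p hp; exact hreach p (List.mem_toFinset.mp hp)
        · intro p hp q hadj hinbq heligq
          rw [List.mem_toFinset] at hp
          rw [List.mem_toFinset]
          exact (hseen q).mp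
            (hclosed p (by rwa [List.take_of_length_le (by omega)]) q hadj hinbq heligq)

-- under Pre_, reading the start cell succeeds
lemma dgGet_start {A : List (List (Option Int))} {r c : Int}
    (hpre : Pre_delete_group A r c) : ∃ v, dgGet A r c = some v := by
  unfold dgGet
  rcases hpre with ⟨hsq, h1, h2, h3, h4⟩ | ⟨hri, hci, _⟩
  · rw [PySem.List.pyGet?_eq_some_getElem A h1 h2]
    dsimp only
    rw [PySem.List.pyGet?_eq_some_getElem _ h3
      (by rw [hsq _ (List.getElem_mem _)]; exact_mod_cast h4)]
    exact ⟨_, rfl⟩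
  · cases hrow : PySem.List.pyGet? A r with
    | none => exact absurd ((PySem.List.pyGet?_eq_none_iff A r).mp hrow) (by simpa using hri)
    | some row =>
        rw [hrow] at hci
        simp only [Option.getD_some] at hci
        dsimp only
        cases hcv : PySem.List.pyGet? row c with
        | none => exact absurd ((PySem.List.pyGet?_eq_none_iff row c).mp hcv) (by simpa using hci)
        | some v => exact ⟨v, rfl⟩

-- ===== VERDICT (by name: the statement is the Claim_ definition above) =====
theorem delete_group_spec : Claim_equal_delete_group := by
  unfold Claim_equal_delete_group
  intro A r c _hdom hpre
  unfold Spec_delete_group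
  obtain ⟨v, hget⟩ := dgGet_start hpre
  rcases hpre with ⟨hsq, h1, h2, h3, h4⟩ | ⟨hri, hci, hnb⟩
  · have hstartinb : dgInb (A.length : Int) (r, c) = true := by
      simp [dgInb]
      omega
    have hcardall : (dgAll (A.length : Int)).card = A.length * A.length := by
      rw [dgCard_all]
      simp
    -- A's side
    obtain ⟨X, hgoodA, heqA⟩ := dgLoopA_spec A v (r, c) hsq (A.length * A.length + 2)
      [(r, c)] PySem.Set.empty ∅ 0
      (by intro p; simp [PySem.Set.empty])
      (by intro p hp; simp at hp)
      (by intro p hp; simp at hp)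
      (by simp)
      (by intro p _ hp; simp at hp)
      (by rintro p (hp | hp)
          · simp at hp
          · rw [List.mem_singleton.mp hp]; exact hstartinb)
      (by rintro p (hp | hp)
          · simp at hp
          · rw [List.mem_singleton.mp hp]; exact dgReach.base)
      (by intro p hp; simp at hp)
      (Or.inr (by simp))
      (by simp)
      (by simp only [PySem.Set.empty, List.toFinset_nil, Finset.sdiff_empty, List.length_singleton]
          omega)
    rw [dgMark_empty] at heqA
    -- B's side
    obtain ⟨qf, heqB, hndf, hinbf, hgoodB⟩ := dgLoopB_spec A v (r, c)
      (A.length * A.length + 2) 0 [(r, c)] (PySem.Set.ofList [(r, c)])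
      (by intro p; rw [PySem.Set.mem_ofList])
      (by simp)
      (by intro p hp; rw [List.mem_singleton.mp hp]; exact hstartinb)
      (by intro p hp; rw [List.mem_singleton.mp hp]; exact dgReach.base)
      (by intro p hp; simp at hp)
      (by simp)
      (by
        have hle : (dgAll (A.length : Int) \ (PySem.Set.ofList [(r, c)]).toFinset).card ≤
            (dgAll (A.length : Int)).card := Finset.card_le_card (Finset.sdiff_subset)
        simp only [List.length_singleton]
        omega)
    -- the two finished fills coincide
    have hXq : X = qf.toFinset := dgGood_unique hgoodA hgoodB
    have hmarks : qf.foldl (fun h p => dgSet h p.1 p.2 none) A = dgMark A X := by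
      have := dgFoldSet_mark hsq qf ∅ hinbf
      rw [dgMark_empty, Finset.empty_union] at this
      rw [this, hXq]
    have hcard : (X.card : Int) = (qf.length : Int) := by
      rw [hXq, List.toFinset_card_of_nodup hndf]
    show delete_group A r c = delete_group_alt A r c
    unfold delete_group delete_group_alt
    rw [hget]
    dsimp only
    rw [show PySem.List.len A = (A.length : Int) from PySem.List.len_eq A]
    rw [heqB]
    rw [heqA, hmarks, hcard]
    rw [PySem.List.len_eq]
  · -- the isolated-start branch: every neighbour fails the bounds test, both fills stop at once
    have hfA1 : dgInb (A.length : Int) (r + 1, c) = false := by simp [dgInb]; omega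
    have hfA2 : dgInb (A.length : Int) (r + -1, c) = false := by simp [dgInb]; omega
    have hfA3 : dgInb (A.length : Int) (r, c + 1) = false := by simp [dgInb]; omega
    have hfA4 : dgInb (A.length : Int) (r, c + -1) = false := by simp [dgInb]; omega
    have hfB2 : dgInb (A.length : Int) (r - 1, c) = false := by simp [dgInb]; omega
    have hfB4 : dgInb (A.length : Int) (r, c - 1) = false := by simp [dgInb]; omega
    have hsA1 : ∀ acc : List (Int × Int) × PySem.Set (Int × Int),
        dgStepA (A.length : Int) v (dgSet A r c none) r c acc (1, 0) = acc := by
      intro acc; simp [dgStepA, hfA1]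
    have hsA2 : ∀ acc : List (Int × Int) × PySem.Set (Int × Int),
        dgStepA (A.length : Int) v (dgSet A r c none) r c acc (-1, 0) = acc := by
      intro acc; simp [dgStepA, hfA2]
    have hsA3 : ∀ acc : List (Int × Int) × PySem.Set (Int × Int),
        dgStepA (A.length : Int) v (dgSet A r c none) r c acc (0, 1) = acc := by
      intro acc; simp [dgStepA, hfA3]
    have hsA4 : ∀ acc : List (Int × Int) × PySem.Set (Int × Int),
        dgStepA (A.length : Int) v (dgSet A r c none) r c acc (0, -1) = acc := by
      intro acc; simp [dgStepA, hfA4]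
    have hfoldA : dgDiff.foldl (dgStepA (A.length : Int) v (dgSet A r c none) r c)
        ([], PySem.Set.add PySem.Set.empty (r, c)) =
        ([], PySem.Set.add PySem.Set.empty (r, c)) := by
      simp only [dgDiff, List.foldl_cons, List.foldl_nil, hsA1, hsA2, hsA3, hsA4]
    have hsB1 : ∀ acc : List (Int × Int) × PySem.Set (Int × Int),
        dgStepB A (A.length : Int) v acc (r + 1, c) = acc := by
      intro acc; simp [dgStepB, hfA1]
    have hsB2 : ∀ acc : List (Int × Int) × PySem.Set (Int × Int),
        dgStepB A (A.length : Int) v acc (r - 1, c) = acc := by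
      intro acc; simp [dgStepB, hfB2]
    have hsB3 : ∀ acc : List (Int × Int) × PySem.Set (Int × Int),
        dgStepB A (A.length : Int) v acc (r, c + 1) = acc := by
      intro acc; simp [dgStepB, hfA3]
    have hsB4 : ∀ acc : List (Int × Int) × PySem.Set (Int × Int),
        dgStepB A (A.length : Int) v acc (r, c - 1) = acc := by
      intro acc; simp [dgStepB, hfB4]
    have hfoldB : [(r + 1, c), (r - 1, c), (r, c + 1), (r, c - 1)].foldl
        (dgStepB A (A.length : Int) v) ([(r, c)], PySem.Set.ofList [(r, c)]) =
        ([(r, c)], PySem.Set.ofList [(r, c)]) := by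
      simp only [List.foldl_cons, List.foldl_nil, hsB1, hsB2, hsB3, hsB4]
    show delete_group A r c = delete_group_alt A r c
    unfold delete_group delete_group_alt
    rw [hget]
    dsimp only
    rw [show PySem.List.len A = (A.length : Int) from PySem.List.len_eq A]
    rw [show dgLoopA (A.length : Int) v (A.length * A.length + 2) [(r, c)] PySem.Set.empty A 0 =
        dgLoopA (A.length : Int) v (A.length * A.length + 1)
          (dgDiff.foldl (dgStepA (A.length : Int) v (dgSet A r c none) r c)
            ([], PySem.Set.add PySem.Set.empty (r, c))).1
          (dgDiff.foldl (dgStepA (A.length : Int) v (dgSet A r c none) r c)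
            ([], PySem.Set.add PySem.Set.empty (r, c))).2
          (dgSet A r c none) (0 + 1) from rfl]
    rw [hfoldA]
    rw [show dgLoopB A (A.length : Int) v (A.length * A.length + 2) 0 [(r, c)]
          (PySem.Set.ofList [(r, c)]) =
        dgLoopB A (A.length : Int) v (A.length * A.length + 1) (0 + 1)
          ([(r + 1, c), (r - 1, c), (r, c + 1), (r, c - 1)].foldl
            (dgStepB A (A.length : Int) v) ([(r, c)], PySem.Set.ofList [(r, c)])).1
          ([(r + 1, c), (r - 1, c), (r, c + 1), (r, c - 1)].foldl
            (dgStepB A (A.length : Int) v) ([(r, c)], PySem.Set.ofList [(r, c)])).2 from rfl]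
    rw [hfoldB]
    rw [show dgLoopB A (A.length : Int) v (A.length * A.length + 1) (0 + 1) [(r, c)]
          (PySem.Set.ofList [(r, c)]) = [(r, c)] from rfl]
    simp [PySem.List.len_eq, dgLoopA]
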